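-- pv_equiv track=rewrite | github.com/andrewblim/advent-of-code-2020 | py/advent_of_code_2020/day24.py | move_to_tile
-- ===== SOURCE A (Python) =====
-- def move_to_tile(moves, start=(0,0)):
--     cur = start
--     for move in moves:
--         if move == "e":
--             cur = (cur[0] + 2, cur[1])
--         elif move == "w":
--             cur = (cur[0] - 2, cur[1])
--         elif move == "ne":
--             cur = (cur[0] + 1, cur[1] + 1)
--         elif move == "nw":
--             cur = (cur[0] - 1, cur[1] + 1)
--         elif move == "se":
--             cur = (cur[0] + 1, cur[1] - 1)
--         elif move == "sw":
--             cur = (cur[0] - 1, cur[1] - 1)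
--         else:
--             raise RuntimeError(f"unrecognized move {move}")
--     return cur
-- ===== SOURCE B (Python) =====
-- def move_to_tile(moves, start=(0,0)):
--     counts = {}
--     for move in moves:
--         if move not in ("e", "w", "ne", "nw", "se", "sw"):
--             raise RuntimeError(f"unrecognized move {move}")
--         counts[move] = counts.get(move, 0) + 1
--     c = counts.get
--     return (start[0] + 2 * c("e", 0) - 2 * c("w", 0)
--                      + c("ne", 0) - c("nw", 0) + c("se", 0) - c("sw", 0),
--             start[1] + c("ne", 0) + c("nw", 0) - c("se", 0) - c("sw", 0))
-- ===== Notes on version B (the rewrite author's own statement) =====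
-- stated objective: alternative
-- what changed: Replaces per-move branched coordinate accumulation with one tally pass building a move histogram, then computes the final coordinate in a single closed-form arithmetic expression from the six counts.
import Mathlib
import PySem

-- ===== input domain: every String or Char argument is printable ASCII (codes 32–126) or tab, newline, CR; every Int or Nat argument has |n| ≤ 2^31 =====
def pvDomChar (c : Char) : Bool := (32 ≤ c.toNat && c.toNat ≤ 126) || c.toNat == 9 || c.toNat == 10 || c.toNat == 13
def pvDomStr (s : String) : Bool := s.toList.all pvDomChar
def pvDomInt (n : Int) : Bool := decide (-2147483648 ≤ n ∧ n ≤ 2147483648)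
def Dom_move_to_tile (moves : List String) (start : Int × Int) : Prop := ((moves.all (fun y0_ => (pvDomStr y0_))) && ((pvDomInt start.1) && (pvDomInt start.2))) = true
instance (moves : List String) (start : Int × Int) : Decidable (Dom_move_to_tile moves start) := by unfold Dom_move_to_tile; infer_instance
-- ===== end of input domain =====

-- B replaces per-move branched accumulation by a histogram pass plus one closed-form
-- arithmetic combination of the six counts (alternative decomposition, same cost).

-- ===== PORT A =====
-- Literal port of A's loop; the `else` branch is Python's `raise RuntimeError`,
-- excluded by Pre_move_to_tile (the port leaves `cur` unchanged there).
def move_to_tile (moves : List String) (start : Int × Int) : Int × Int :=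
  moves.foldl (fun cur move =>
    if move == "e" then (cur.1 + 2, cur.2)
    else if move == "w" then (cur.1 - 2, cur.2)
    else if move == "ne" then (cur.1 + 1, cur.2 + 1)
    else if move == "nw" then (cur.1 - 1, cur.2 + 1)
    else if move == "se" then (cur.1 + 1, cur.2 - 1)
    else if move == "sw" then (cur.1 - 1, cur.2 - 1)
    else cur) start

-- ===== PORT B =====
-- Literal port of Source B: build the counts dict in one pass (the `raise` on an
-- unrecognized move is excluded by Pre_move_to_tile), then one closed-form expression.
def move_to_tile_alt (moves : List String) (start : Int × Int) : Int × Int :=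
  let counts : PySem.Dict String Int :=
    moves.foldl (fun d m => d.insert m (d.getD m 0 + 1)) PySem.Dict.empty
  let c := fun k => counts.getD k 0
  (start.1 + 2 * c "e" - 2 * c "w" + c "ne" - c "nw" + c "se" - c "sw",
   start.2 + c "ne" + c "nw" - c "se" - c "sw")

-- ===== PRECONDITION & SPEC =====
-- Pre_: exactly the inputs where Python A returns (no RuntimeError): every move is recognized.
def Pre_move_to_tile (moves : List String) (start : Int × Int) : Prop :=
  ∀ m ∈ moves, m ∈ (["e", "w", "ne", "nw", "se", "sw"] : List String)
instance (moves : List String) (start : Int × Int) : Decidable (Pre_move_to_tile moves start) := by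
  unfold Pre_move_to_tile; infer_instance

def pvWitness_move_to_tile : List String × (Int × Int) := (["e", "sw", "ne", "e"], (3, -1))

def Spec_move_to_tile (moves : List String) (start : Int × Int) (out : Int × Int) : Prop :=
  out = move_to_tile_alt moves start
instance (moves : List String) (start : Int × Int) (out : Int × Int) : Decidable (Spec_move_to_tile moves start out) := by
  unfold Spec_move_to_tile; infer_instance

-- ===== CLAIM =====
def Claim_equal_move_to_tile : Prop :=
  ∀ (moves : List String) (start : Int × Int), Dom_move_to_tile moves start →
    Pre_move_to_tile moves start → Spec_move_to_tile moves start (move_to_tile moves start)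

-- ===== LEMMAS AND PROOFS =====
-- Closed form both ports reach: start shifted by per-direction counts.
def pvCounts (moves : List String) (start : Int × Int) : Int × Int :=
  (start.1 + 2 * (moves.count "e" : Int) - 2 * (moves.count "w" : Int)
     + (moves.count "ne" : Int) - (moves.count "nw" : Int)
     + (moves.count "se" : Int) - (moves.count "sw" : Int),
   start.2 + (moves.count "ne" : Int) + (moves.count "nw" : Int)
     - (moves.count "se" : Int) - (moves.count "sw" : Int))

lemma move_to_tile_eq_pvCounts (moves : List String) (start : Int × Int)
    (h : Pre_move_to_tile moves start) : move_to_tile moves start = pvCounts moves start := by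
  induction moves generalizing start with
  | nil => simp [move_to_tile, pvCounts]
  | cons m rest ih =>
    have hm := h m (List.mem_cons_self ..)
    have hrest : ∀ s, Pre_move_to_tile rest s := fun _ x hx => h x (List.mem_cons_of_mem _ hx)
    simp only [move_to_tile, List.foldl_cons, beq_iff_eq] at ih ⊢
    fin_cases hm <;>
      · norm_num
        rw [ih _ (hrest _)]
        simp [pvCounts]
        omega

lemma move_to_tile_alt_eq_pvCounts (moves : List String) (start : Int × Int) :
    move_to_tile_alt moves start = pvCounts moves start := by
  simp [move_to_tile_alt, pvCounts, PySem.Dict.getD_foldl_insert_add_one, PySem.Dict.getD_empty]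

-- ===== VERDICT =====
theorem move_to_tile_spec : Claim_equal_move_to_tile := by
  intro moves start _ hpre
  unfold Spec_move_to_tile
  rw [move_to_tile_eq_pvCounts moves start hpre, move_to_tile_alt_eq_pvCounts]
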